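-- pv_equiv track=rewrite | github.com/GalegoSonolento/Exercicios_Algorit_Prog_Fund_Unisinos | Aula 9/Exercícios de fixação parâmetros/1-10.py | listaString
-- ===== SOURCE A (Python) =====
-- def listaString(a):
--     base = 0
--     cont = 0
--     for i in a:
--         if cont == 0:
--             base = i
--             cont += 1
--         elif len(i) < len(base):
--             base = i
--             cont += 1
--     return base
-- ===== SOURCE B (Python) =====
-- def listaString(a):
--     return sorted(a, key=len)[0] if a else 0
-- ===== Notes on version B (the rewrite author's own statement) =====
-- stated objective: alternative
-- what changed: Replaces the manual strict-< min scan with a stable sort by length followed by taking the first element (stability preserves the first-of-ties behaviour).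
-- outside the precondition, e.g. on listaString([]): A returns 0, B returns 0
import Mathlib
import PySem

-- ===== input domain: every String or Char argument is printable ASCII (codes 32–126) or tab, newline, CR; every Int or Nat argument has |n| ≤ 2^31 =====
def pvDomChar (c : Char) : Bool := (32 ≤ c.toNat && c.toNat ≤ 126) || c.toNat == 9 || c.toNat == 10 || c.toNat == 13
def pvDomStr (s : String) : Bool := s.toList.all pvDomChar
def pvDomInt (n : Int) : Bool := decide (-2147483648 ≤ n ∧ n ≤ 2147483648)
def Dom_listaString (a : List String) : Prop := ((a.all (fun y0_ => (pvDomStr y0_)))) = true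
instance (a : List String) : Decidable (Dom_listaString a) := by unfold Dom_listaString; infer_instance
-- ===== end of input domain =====

-- B replaces A's manual strict-< min scan by a stable sort on length, then takes the first element.
-- On the empty list both Pythons return the int 0 (not a string), so Pre_ excludes it.

-- ===== PORT A =====
-- state = (base, cont); base is `none` while cont == 0 mirrors Python's initial int 0 sentinel
def listaStringStep (s : Option String × Int) (i : String) : Option String × Int :=
  if s.2 == 0 then (some i, s.2 + 1)
  else match s.1 with
    | some base => if PySem.Str.len i < PySem.Str.len base then (some i, s.2 + 1) else s
    | none => s

def listaString (a : List String) : String :=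
  ((a.foldl listaStringStep (none, 0)).1).getD ""

-- ===== PORT B =====
def listaString_alt (a : List String) : String :=
  (PySem.List.pyGet? (PySem.List.sorted a (fun s => PySem.Str.len s) false) 0).getD ""

-- ===== PRECONDITION & SPEC =====
-- Pre_ excludes only the empty list, on which both Pythons return the int 0, a value outside the String return type.
def Pre_listaString (a : List String) : Prop := a ≠ []
instance (a : List String) : Decidable (Pre_listaString a) := by unfold Pre_listaString; infer_instance
def pvWitness_listaString : List String := ["ab", "c", "de"]

def Spec_listaString (a : List String) (out : String) : Prop := out = listaString_alt a
instance (a : List String) (out : String) : Decidable (Spec_listaString a out) := by unfold Spec_listaString; infer_instance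

-- ===== CLAIM (what is proved, stated in full; the proofs are below) =====
def Claim_equal_listaString : Prop := ∀ (a : List String), Dom_listaString a → Pre_listaString a → Spec_listaString a (listaString a)

-- ===== LEMMAS AND PROOFS =====

-- the pure min-fold both programs compute the head of
def minStep (b i : String) : String := if PySem.Str.len i < PySem.Str.len b then i else b

lemma foldA (xs : List String) (b : String) (c : Int) (hc : 0 < c) :
    (xs.foldl listaStringStep (some b, c)).1 = some (xs.foldl minStep b) := by
  induction xs generalizing b c with
  | nil => rfl
  | cons x xs ih =>
    simp only [List.foldl, listaStringStep, minStep]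
    have hcz : (c == 0) = false := by simp; omega
    rw [hcz]
    simp only [Bool.false_eq_true, if_false]
    split
    · exact ih x (c + 1) (by omega)
    · exact ih b c hc

lemma foldB (xs : List String) (b : String) (acc : List String) :
    ∃ acc', xs.foldl (fun acc x =>
        PySem.List.insertBy (fun s t => decide (PySem.Str.len s < PySem.Str.len t)) x acc) (b :: acc)
      = (xs.foldl minStep b) :: acc' := by
  induction xs generalizing b acc with
  | nil => exact ⟨acc, rfl⟩
  | cons x xs ih =>
    simp only [List.foldl, PySem.List.insertBy, minStep]
    by_cases h : PySem.Str.len x < PySem.Str.len b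
    · simp only [h, decide_true, if_true]
      exact ih x (b :: acc)
    · simp only [h, decide_false, Bool.false_eq_true, if_false]
      exact ih b _

lemma altA (x : String) (xs : List String) : listaString (x :: xs) = xs.foldl minStep x := by
  have h1 : listaStringStep (none, (0:Int)) x = (some x, 1) := by
    simp [listaStringStep]
  simp only [listaString, List.foldl, h1, foldA xs x 1 (by omega)]
  rfl

lemma altB (x : String) (xs : List String) : listaString_alt (x :: xs) = xs.foldl minStep x := by
  simp only [listaString_alt,
    PySem.List.sorted_eq_foldl_insertBy (x :: xs) (fun s => PySem.Str.len s)]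
  simp only [List.foldl, PySem.List.insertBy]
  obtain ⟨acc', h⟩ := foldB xs x []
  rw [h]
  simp [PySem.List.pyGet?, PySem.List.pyIdx?]

-- ===== VERDICT (by name: the statement is the Claim_ definition above) =====
theorem listaString_spec : Claim_equal_listaString := by
  intro a _ hpre
  match a with
  | [] => exact absurd rfl hpre
  | x :: xs => unfold Spec_listaString; rw [altA, altB]
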